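-- pv_equiv track=rewrite | github.com/981377660LMT/algorithm-study | 22_专题/离线查询/树上预处理queryGroup/PersistentUnionFind-离线.py | solve
-- ===== SOURCE A (Python) =====
-- from typing import List
--
-- def solve(n: int, operations: List[List[int]]) -> List[int]:
--     def dfs(curVersion: int) -> None:
--         """版本树上dfs处理所有查询"""
--         for num1, num2, qi in queryGroup[curVersion]:
--             res[qi] = 1 if uf.isConnected(num1, num2) else 0
--         for next, num1, num2 in adjList[curVersion]:
--             uf.union(num1, num2)
--             dfs(next)
--             uf.revocate()
--
--     m = len(operations)
--     uf = RevocableUnionFindArray(n + 10)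
--     adjList = [[] for _ in range(m + 10)]  # !版本间转移形成的树
--     queryGroup = [[] for _ in range(m + 10)]  # !每个版本处的查询
--     git = [0] * (m + 10)  # !每次操作后的版本号,初始版本为0
--     curVersion = 0
--     for i in range(m):
--         kind, *args = operations[i]
--         if kind == 1:  # action
--             num1, nums2 = args
--             adjList[curVersion].append((curVersion + 1, num1, nums2))
--             curVersion += 1
--         elif kind == 2:  # action
--             k = args[0]
--             preVersion = git[k]
--             adjList[preVersion].append((curVersion + 1, 0, 0))
--             curVersion += 1
--         elif kind == 3:  # query
--             num1, nums2 = args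
--             queryGroup[curVersion].append((num1, nums2, i))
--         git[i + 1] = curVersion
--
--     res = [-1] * (m + 10)
--     dfs(0)
--     return [num for num in res if num != -1]
--
-- class RevocableUnionFindArray:
--     """
--     带撤销操作的并查集
--
--     不能使用路径压缩优化（因为路径压缩会改变结构）；
--     为了不超时必须使用按秩合并优化,复杂度nlogn
--     """
--
--     __slots__ = ("n", "part", "parent", "rank", "optStack")
--
--     def __init__(self, n: int):
--         self.n = n
--         self.part = n
--         self.parent = list(range(n))
--         self.rank = [1] * n
--         self.optStack = []
--
--     def find(self, x: int) -> int:
--         """不能使用路径压缩优化"""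
--         while self.parent[x] != x:
--             x = self.parent[x]
--         return x
--
--     def union(self, x: int, y: int) -> bool:
--         """x所在组合并到y所在组"""
--         rootX = self.find(x)
--         rootY = self.find(y)
--         if rootX == rootY:
--             self.optStack.append((-1, -1, -1))
--             return False
--
--         if self.rank[rootX] > self.rank[rootY]:
--             rootX, rootY = rootY, rootX
--
--         self.parent[rootX] = rootY
--         self.rank[rootY] += self.rank[rootX]
--         self.part -= 1
--         self.optStack.append((rootX, rootY, self.rank[rootX]))
--         return True
--
--     def revocate(self) -> None:
--         """
--         用一个栈记录前面的合并操作，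
--         撤销时要依次取出栈顶元素做合并操作的逆操作
--         """
--         if not self.optStack:
--             raise IndexError("no union option to revocate")
--
--         rootX, rootY, rankX = self.optStack.pop()
--         if rootX == -1:
--             return
--
--         self.parent[rootX] = rootX
--         self.rank[rootY] -= rankX
--         self.part += 1
--
--     def isConnected(self, x: int, y: int) -> bool:
--         return self.find(x) == self.find(y)
-- ===== SOURCE B (Python) =====
-- from typing import List
--
--
-- def solve(n: int, operations: List[List[int]]) -> List[int]:
--     m = len(operations)
--     uf = RevocableUnionFindArray(n + 10)
--     git = [0] * (m + 10)
--     children = {}  # version -> list of (childVersion, a, b)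
--     queries = {}  # version -> list of (a, b, query index)
--     cur = 0
--     for i, op in enumerate(operations):
--         kind = op[0]
--         if kind == 1:
--             children.setdefault(cur, []).append((cur + 1, op[1], op[2]))
--             cur += 1
--         elif kind == 2:
--             children.setdefault(git[op[1]], []).append((cur + 1, 0, 0))
--             cur += 1
--         elif kind == 3:
--             queries.setdefault(cur, []).append((op[1], op[2], i))
--         git[i + 1] = cur
--
--     # flat interpreter over an instruction stack instead of recursion
--     res = [-1] * (m + 10)
--     todo = [("visit", 0, 0, 0)]
--     while todo:
--         tag, x, y, z = todo.pop()
--         if tag == "visit":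
--             prog = [("query", a, b, qi) for a, b, qi in queries.get(x, [])]
--             for child, a, b in children.get(x, []):
--                 prog += [("union", a, b, 0), ("visit", child, 0, 0), ("revoke", 0, 0, 0)]
--             todo += reversed(prog)
--         elif tag == "query":
--             res[z] = 1 if uf.isConnected(x, y) else 0
--         elif tag == "union":
--             uf.union(x, y)
--         else:
--             uf.revocate()
--     return [v for v in res if v != -1]
--
--
-- class RevocableUnionFindArray:
--     __slots__ = ("n", "part", "parent", "rank", "optStack")
--
--     def __init__(self, n: int):
--         self.n = n
--         self.part = n
--         self.parent = list(range(n))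
--         self.rank = [1] * n
--         self.optStack = []
--
--     def find(self, x: int) -> int:
--         while self.parent[x] != x:
--             x = self.parent[x]
--         return x
--
--     def union(self, x: int, y: int) -> bool:
--         rootX = self.find(x)
--         rootY = self.find(y)
--         if rootX == rootY:
--             self.optStack.append((-1, -1, -1))
--             return False
--         if self.rank[rootX] > self.rank[rootY]:
--             rootX, rootY = rootY, rootX
--         self.parent[rootX] = rootY
--         self.rank[rootY] += self.rank[rootX]
--         self.part -= 1
--         self.optStack.append((rootX, rootY, self.rank[rootX]))
--         return True
--
--     def revocate(self) -> None:
--         if not self.optStack: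
--             raise IndexError("no union option to revocate")
--         rootX, rootY, rankX = self.optStack.pop()
--         if rootX == -1:
--             return
--         self.parent[rootX] = rootX
--         self.rank[rootY] -= rankX
--         self.part += 1
--
--     def isConnected(self, x: int, y: int) -> bool:
--         return self.find(x) == self.find(y)
-- ===== Notes on version B (the rewrite author's own statement) =====
-- stated objective: alternative
-- what changed: The recursive dfs over the version tree is replaced by a flat iterative interpreter over an explicit instruction stack (visit/query/union/revoke frames), with children and queries grouped in dictionaries instead of preallocated per-version lists.
import Mathlib
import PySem

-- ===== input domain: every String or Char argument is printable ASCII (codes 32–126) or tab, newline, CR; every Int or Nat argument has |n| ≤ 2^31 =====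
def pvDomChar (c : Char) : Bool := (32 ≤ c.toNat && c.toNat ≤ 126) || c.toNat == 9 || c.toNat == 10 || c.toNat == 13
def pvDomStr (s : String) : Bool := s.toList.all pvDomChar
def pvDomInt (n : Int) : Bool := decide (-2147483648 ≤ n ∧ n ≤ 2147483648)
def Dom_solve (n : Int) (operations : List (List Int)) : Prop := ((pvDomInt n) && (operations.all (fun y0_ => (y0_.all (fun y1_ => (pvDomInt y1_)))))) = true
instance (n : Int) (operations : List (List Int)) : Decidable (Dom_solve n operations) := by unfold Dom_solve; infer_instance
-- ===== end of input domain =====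

-- B differs from A only in the traversal (flat instruction-stack interpreter vs recursion)
-- and in grouping (dicts vs preallocated lists); the RevocableUnionFindArray class is shared
-- verbatim by both Pythons, so its port below is shared by both Lean ports.

-- ===== SHARED HELPERS (the RevocableUnionFindArray class, identical in Source A and Source B) =====

structure UF where
  parent : List Int
  rank : List Int
  part : Int
  optStack : List (Int × Int × Int)
deriving Repr, DecidableEq

def ufInit (n : Int) : UF :=
  { parent := (List.range n.toNat).map Int.ofNat
  , rank := List.replicate n.toNat 1
  , part := n
  , optStack := [] }

-- `while self.parent[x] != x: x = self.parent[x]` — fuel-bounded; on the states both programs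
-- reach (a forest over the admitted indices) the fuel `parent.length + 2` is never exhausted.
def ufFindGo (parent : List Int) : Nat → Int → Int
  | 0, x => x
  | f + 1, x =>
    match PySem.List.pyGet? parent x with
    | none => x   -- Python raises IndexError here; excluded by Pre_solve
    | some p => if p = x then x else ufFindGo parent f p

def ufFind (uf : UF) (x : Int) : Int := ufFindGo uf.parent (uf.parent.length + 2) x

def ufUnion (uf : UF) (x : Int) (y : Int) : UF :=
  let rootX := ufFind uf x
  let rootY := ufFind uf y
  if rootX = rootY then { uf with optStack := (-1, -1, -1) :: uf.optStack }
  else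
    let swap := PySem.List.pyGetD uf.rank rootX 0 > PySem.List.pyGetD uf.rank rootY 0
    let rX := if swap then rootY else rootX
    let rY := if swap then rootX else rootY
    let rankX := PySem.List.pyGetD uf.rank rX 0
    { uf with
      parent := uf.parent.set rX.toNat rY
      rank := uf.rank.set rY.toNat (PySem.List.pyGetD uf.rank rY 0 + rankX)
      part := uf.part - 1
      optStack := (rX, rY, rankX) :: uf.optStack }

def ufRevoke (uf : UF) : UF :=
  match uf.optStack with
  | [] => uf   -- Python raises here; unreachable: in both programs every revoke follows a union
  | (rX, rY, rankX) :: rest =>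
    if rX = -1 then { uf with optStack := rest }
    else { uf with
      optStack := rest
      parent := uf.parent.set rX.toNat rX
      rank := uf.rank.set rY.toNat (PySem.List.pyGetD uf.rank rY 0 - rankX)
      part := uf.part + 1 }

def ufConnected (uf : UF) (x : Int) (y : Int) : Bool := ufFind uf x == ufFind uf y

-- ===== PORT A =====

structure BuildA where
  adj : List (List (Int × Int × Int))
  qg : List (List (Int × Int × Int))
  git : List Int
  cur : Int
deriving Repr

-- one iteration of A's `for i in range(m)` build loop
def stepA (i : Nat) (op : List Int) (st : BuildA) : BuildA :=
  let kind := PySem.List.pyGetD op 0 0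
  let st' :=
    if kind = 1 then
      { st with
        adj := st.adj.set st.cur.toNat
          (PySem.List.pyGetD st.adj st.cur [] ++ [(st.cur + 1, PySem.List.pyGetD op 1 0, PySem.List.pyGetD op 2 0)])
        cur := st.cur + 1 }
    else if kind = 2 then
      let pre := PySem.List.pyGetD st.git (PySem.List.pyGetD op 1 0) 0
      { st with
        adj := st.adj.set pre.toNat (PySem.List.pyGetD st.adj pre [] ++ [(st.cur + 1, 0, 0)])
        cur := st.cur + 1 }
    else if kind = 3 then
      { st with
        qg := st.qg.set st.cur.toNat
          (PySem.List.pyGetD st.qg st.cur [] ++ [(PySem.List.pyGetD op 1 0, PySem.List.pyGetD op 2 0, (i : Int))]) }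
    else st
  { st' with git := st'.git.set (i + 1) st'.cur }

def loopA : List (List Int) → Nat → BuildA → BuildA
  | [], _, st => st
  | op :: rest, i, st => loopA rest (i + 1) (stepA i op st)

-- the recursive dfs (fuel = recursion depth; m+10 exceeds the depth of the version tree)
def dfsA (adj qg : List (List (Int × Int × Int))) : Nat → Int → UF × List Int → UF × List Int
  | 0, _, st => st
  | f + 1, v, st =>
    (PySem.List.pyGetD adj v []).foldl
      (fun st e =>
        let st2 := dfsA adj qg f e.1 (ufUnion st.1 e.2.1 e.2.2, st.2)
        (ufRevoke st2.1, st2.2))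
      ((PySem.List.pyGetD qg v []).foldl
        (fun st q => (st.1, st.2.set q.2.2.toNat (if ufConnected st.1 q.1 q.2.1 then 1 else 0))) st)

def solve (n : Int) (operations : List (List Int)) : List Int :=
  let m := operations.length
  let b := loopA operations 0
    { adj := List.replicate (m + 10) [], qg := List.replicate (m + 10) []
    , git := List.replicate (m + 10) 0, cur := 0 }
  let st := dfsA b.adj b.qg (m + 10) 0 (ufInit (n + 10), List.replicate (m + 10) (-1))
  st.2.filter (fun v => v != -1)

-- ===== PORT B =====

structure BuildB where
  children : PySem.Dict Int (List (Int × Int × Int))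
  queries : PySem.Dict Int (List (Int × Int × Int))
  git : List Int
  cur : Int
deriving Repr

-- one iteration of B's build loop (setdefault(v, []).append(x) = modify v [] (· ++ [x]))
def stepB (i : Nat) (op : List Int) (st : BuildB) : BuildB :=
  let kind := PySem.List.pyGetD op 0 0
  let st' :=
    if kind = 1 then
      { st with
        children := st.children.modify st.cur []
          (· ++ [(st.cur + 1, PySem.List.pyGetD op 1 0, PySem.List.pyGetD op 2 0)])
        cur := st.cur + 1 }
    else if kind = 2 then
      let pre := PySem.List.pyGetD st.git (PySem.List.pyGetD op 1 0) 0
      { st with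
        children := st.children.modify pre [] (· ++ [(st.cur + 1, 0, 0)])
        cur := st.cur + 1 }
    else if kind = 3 then
      { st with
        queries := st.queries.modify st.cur []
          (· ++ [(PySem.List.pyGetD op 1 0, PySem.List.pyGetD op 2 0, (i : Int))]) }
    else st
  { st' with git := st'.git.set (i + 1) st'.cur }

def loopB : List (List Int) → Nat → BuildB → BuildB
  | [], _, st => st
  | op :: rest, i, st => loopB rest (i + 1) (stepB i op st)

-- the instruction frames of B's flat interpreter ("visit"/"query"/"union"/"revoke" tuples);
-- visit carries the depth fuel the Lean port needs for totality (B's Python needs none)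
inductive VFrame where
  | visit (f : Nat) (v : Int)
  | query (a b qi : Int)
  | union (a b : Int)
  | revoke
deriving Repr, DecidableEq

-- termination measure helpers and lemmas for runB (cited by its decreasing_by only)
def frameW (E : Nat) : VFrame → Nat
  | VFrame.visit f _ => (E + 3) ^ (f + 1)
  | _ => 1

def stackW (E : Nat) (k : List VFrame) : Nat := (k.map (frameW E)).sum

def dictE (d : PySem.Dict Int (List (Int × Int × Int))) : Nat := (d.values.map List.length).sum

theorem frameW_pos (E : Nat) (fr : VFrame) : 0 < frameW E fr := by
  cases fr with
  | visit f v => exact Nat.pow_pos (Nat.succ_pos (E + 2))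
  | query a b qi => exact Nat.one_pos
  | union a b => exact Nat.one_pos
  | revoke => exact Nat.one_pos

theorem stackW_cons (E : Nat) (f : VFrame) (k : List VFrame) :
    stackW E (f :: k) = frameW E f + stackW E k := rfl

theorem stackW_append (E : Nat) (a b : List VFrame) :
    stackW E (a ++ b) = stackW E a + stackW E b := by
  rw [stackW, stackW, stackW, List.map_append, List.sum_append]

theorem getD_length_le_dictE (d : PySem.Dict Int (List (Int × Int × Int))) (v : Int) :
    (d.getD v []).length ≤ dictE d := by
  rw [PySem.Dict.getD_eq_get?_getD]
  cases h : d.get? v with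
  | none => exact Nat.zero_le _
  | some l =>
    have hmem : (v, l) ∈ d.items := PySem.Dict.mem_items_of_get?_eq_some d h
    have hv : l.length ∈ d.values.map List.length :=
      List.mem_map.mpr ⟨l, List.mem_map.mpr ⟨(v, l), hmem, rfl⟩, rfl⟩
    exact List.single_le_sum (fun x _ => Nat.zero_le x) _ hv

theorem stackW_map_query (E : Nat) (l : List (Int × Int × Int)) :
    stackW E (l.map (fun q => VFrame.query q.1 q.2.1 q.2.2)) = l.length := by
  induction l with
  | nil => rfl
  | cons x t ih =>
    rw [List.map_cons, stackW_cons, ih, List.length_cons]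
    exact Nat.add_comm 1 t.length

theorem stackW_flat_le (E f : Nat) (es : List (Int × Int × Int)) :
    stackW E (es.flatMap (fun e => [VFrame.union e.2.1 e.2.2, VFrame.visit f e.1, VFrame.revoke]))
      ≤ es.length * ((E + 3) ^ (f + 1) + 2) := by
  induction es with
  | nil => exact Nat.zero_le _
  | cons x t ih =>
    rw [List.flatMap_cons, stackW_append, List.length_cons, Nat.succ_mul]
    have h3 : stackW E [VFrame.union x.2.1 x.2.2, VFrame.visit f x.1, VFrame.revoke]
        = (E + 3) ^ (f + 1) + 2 := by
      show 1 + ((E + 3) ^ (f + 1) + (1 + 0)) = (E + 3) ^ (f + 1) + 2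
      rw [Nat.add_zero, Nat.add_comm 1 ((E + 3) ^ (f + 1) + 1)]
    rw [h3, Nat.add_comm (t.length * ((E + 3) ^ (f + 1) + 2)) ((E + 3) ^ (f + 1) + 2)]
    exact Nat.add_le_add_left ih _

theorem stackW_expand_lt (E f : Nat) (qs es : List (Int × Int × Int))
    (hq : qs.length ≤ E) (he : es.length ≤ E) :
    stackW E (qs.map (fun q => VFrame.query q.1 q.2.1 q.2.2)
      ++ es.flatMap (fun e => [VFrame.union e.2.1 e.2.2, VFrame.visit f e.1, VFrame.revoke]))
      < (E + 3) ^ (f + 1 + 1) := by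
  rw [stackW_append, stackW_map_query]
  have hX : E + 3 ≤ (E + 3) ^ (f + 1) := by
    conv_lhs => rw [← pow_one (E + 3)]
    exact Nat.pow_le_pow_right (Nat.succ_le_succ (Nat.zero_le (E + 2))) (Nat.succ_le_succ (Nat.zero_le f))
  have hEX : E < (E + 3) ^ (f + 1) :=
    Nat.lt_of_lt_of_le (Nat.lt_add_of_pos_right (Nat.succ_pos 2)) hX
  calc qs.length + stackW E (es.flatMap (fun e => [VFrame.union e.2.1 e.2.2, VFrame.visit f e.1, VFrame.revoke]))
      ≤ E + E * ((E + 3) ^ (f + 1) + 2) :=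
        Nat.add_le_add hq (Nat.le_trans (stackW_flat_le E f es) (Nat.mul_le_mul_right _ he))
    _ = E * (E + 3) ^ (f + 1) + (E * 2 + E) := by
        rw [Nat.mul_add, Nat.add_comm E (E * (E + 3) ^ (f + 1) + E * 2), Nat.add_assoc]
    _ = E * (E + 3) ^ (f + 1) + E * 3 := by rw [← Nat.mul_succ]
    _ < E * (E + 3) ^ (f + 1) + (E + 3) ^ (f + 1) * 3 :=
        Nat.add_lt_add_left (Nat.mul_lt_mul_of_lt_of_le hEX (Nat.le_refl 3) (Nat.succ_pos 2)) _
    _ = (E + 3) ^ (f + 1) * E + (E + 3) ^ (f + 1) * 3 := by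
        rw [Nat.mul_comm E ((E + 3) ^ (f + 1))]
    _ = (E + 3) ^ (f + 1) * (E + 3) := by rw [← Nat.mul_add]
    _ = (E + 3) ^ (f + 1 + 1) := by rw [← pow_succ]

theorem stackW_lt_cons (E : Nat) (fr : VFrame) (k : List VFrame) :
    stackW E k < stackW E (fr :: k) := by
  rw [stackW_cons]
  exact Nat.lt_add_of_pos_left (frameW_pos E fr)

theorem stackW_visit_lt (E f : Nat) (v : Int) (k : List VFrame) (qs es : List (Int × Int × Int))
    (hq : qs.length ≤ E) (he : es.length ≤ E) :
    stackW E ((qs.map (fun q => VFrame.query q.1 q.2.1 q.2.2)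
        ++ es.flatMap (fun e => [VFrame.union e.2.1 e.2.2, VFrame.visit f e.1, VFrame.revoke])) ++ k)
      < stackW E (VFrame.visit (f + 1) v :: k) := by
  rw [stackW_append, stackW_cons]
  show _ + stackW E k < (E + 3) ^ (f + 1 + 1) + stackW E k
  exact Nat.add_lt_add_right (stackW_expand_lt E f qs es hq he) _

-- the flat interpreter: pop a frame, execute it; a visit frame expands into the frames of
-- its queries and, per child edge, a union / visit / revoke triple (Source B's `prog`)
def runB (ch qs : PySem.Dict Int (List (Int × Int × Int))) :
    List VFrame → UF × List Int → UF × List Int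
  | [], st => st
  | VFrame.visit 0 _ :: k, st => runB ch qs k st   -- fuel guard only; unreachable with the fuel solve_alt passes
  | VFrame.visit (f + 1) v :: k, st =>
    runB ch qs
      (((qs.getD v []).map (fun q => VFrame.query q.1 q.2.1 q.2.2)
        ++ (ch.getD v []).flatMap (fun e => [VFrame.union e.2.1 e.2.2, VFrame.visit f e.1, VFrame.revoke]))
        ++ k) st
  | VFrame.query a b qi :: k, st =>
    runB ch qs k (st.1, st.2.set qi.toNat (if ufConnected st.1 a b then 1 else 0))
  | VFrame.union a b :: k, st => runB ch qs k (ufUnion st.1 a b, st.2)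
  | VFrame.revoke :: k, st => runB ch qs k (ufRevoke st.1, st.2)
termination_by k _ => stackW (dictE ch + dictE qs) k
decreasing_by
  · exact stackW_lt_cons _ _ _
  · exact stackW_visit_lt _ f v k _ _
      ((getD_length_le_dictE qs v).trans (Nat.le_add_left _ _))
      ((getD_length_le_dictE ch v).trans (Nat.le_add_right _ _))
  · exact stackW_lt_cons _ _ _
  · exact stackW_lt_cons _ _ _
  · exact stackW_lt_cons _ _ _

def solve_alt (n : Int) (operations : List (List Int)) : List Int :=
  let m := operations.length
  let b := loopB operations 0
    { children := PySem.Dict.empty, queries := PySem.Dict.empty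
    , git := List.replicate (m + 10) 0, cur := 0 }
  let st := runB b.children b.queries [VFrame.visit (m + 10) 0]
    (ufInit (n + 10), List.replicate (m + 10) (-1))
  st.2.filter (fun v => v != -1)

-- ===== PRECONDITION & SPEC =====

-- Pre_solve = exactly the inputs on which the Python A returns normally: every operation is
-- nonempty; kind-1/3 operations carry exactly two node arguments inside Python's (wraparound)
-- index range of the parent array; kind-2 operations carry a version argument inside git's
-- index range and require a nonempty parent array (they union node 0 with itself).
def Pre_solve (n : Int) (operations : List (List Int)) : Prop :=
  ∀ op ∈ operations, op ≠ [] ∧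
    (op.headI = 1 ∨ op.headI = 3 →
      op.length = 3 ∧ ∀ a ∈ op.tail, -(n + 10) ≤ a ∧ a < n + 10) ∧
    (op.headI = 2 →
      2 ≤ op.length ∧ -((operations.length : Int) + 10) ≤ op.getD 1 0 ∧
      op.getD 1 0 < (operations.length : Int) + 10 ∧ -9 ≤ n)

instance (n : Int) (operations : List (List Int)) : Decidable (Pre_solve n operations) := by
  unfold Pre_solve; infer_instance

def pvWitness_solve : Int × List (List Int) :=
  (2, [[1, 0, 1], [3, 0, 1], [2, 0], [3, 0, 1], [1, 1, 2], [3, 0, 2]])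

def Spec_solve (n : Int) (operations : List (List Int)) (out : List Int) : Prop := out = solve_alt n operations
instance (n : Int) (operations : List (List Int)) (out : List Int) : Decidable (Spec_solve n operations out) := by unfold Spec_solve; infer_instance

-- ===== CLAIM (what is proved, stated in full; the proofs are below) =====
def Claim_equal_solve : Prop := ∀ (n : Int) (operations : List (List Int)), Dom_solve n operations → Pre_solve n operations → Spec_solve n operations (solve n operations)

-- ===== LEMMAS AND PROOFS =====

theorem pyGetD_set_nonneg {α : Type} (l : List α) (iN : Nat) (hi : iN < l.length)
    (x d : α) (v : Int) (hv : 0 ≤ v) :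
    PySem.List.pyGetD (l.set iN x) v d = if v = (iN : Int) then x else PySem.List.pyGetD l v d := by
  lift v to ℕ using hv
  simp only [PySem.List.pyGetD_natCast]
  rw [List.getD_eq_getElem?_getD, List.getD_eq_getElem?_getD, List.getElem?_set]
  by_cases h : iN = v
  · subst h; simp [hi]
  · have hir : ¬((v : Int) = (iN : Int)) := by exact_mod_cast (Ne.symm h)
    simp [h, hir]

theorem pyGetD_default_or_mem {α : Type} (l : List α) (v : Int) (d : α) :
    PySem.List.pyGetD l v d = d ∨ PySem.List.pyGetD l v d ∈ l := by
  cases h : PySem.List.pyGet? l v with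
  | none => left; simp [PySem.List.pyGetD, h]
  | some x =>
    right
    have hx := PySem.List.mem_of_pyGet?_eq_some _ h
    simpa [PySem.List.pyGetD, h] using hx

theorem pyGetD_replicate_nil {α : Type} (nrep : Nat) (v : Int) :
    PySem.List.pyGetD (List.replicate nrep ([] : List α)) v [] = [] := by
  rcases pyGetD_default_or_mem (List.replicate nrep ([] : List α)) v [] with h | h
  · exact h
  · exact List.eq_of_mem_replicate h

-- dfs step equations
theorem dfsA_zero (adj qg : List (List (Int × Int × Int))) (v : Int) (st : UF × List Int) :
    dfsA adj qg 0 v st = st := rfl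

theorem dfsA_succ (adj qg : List (List (Int × Int × Int))) (f : Nat) (v : Int) (st : UF × List Int) :
    dfsA adj qg (f + 1) v st =
      (PySem.List.pyGetD adj v []).foldl
        (fun st e =>
          let st2 := dfsA adj qg f e.1 (ufUnion st.1 e.2.1 e.2.2, st.2)
          (ufRevoke st2.1, st2.2))
        ((PySem.List.pyGetD qg v []).foldl
          (fun st q => (st.1, st.2.set q.2.2.toNat (if ufConnected st.1 q.1 q.2.1 then 1 else 0))) st) := rfl

-- runB step equations
theorem runB_nil (ch qs : PySem.Dict Int (List (Int × Int × Int))) (st : UF × List Int) :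
    runB ch qs [] st = st := by rw [runB]

theorem runB_visit_zero (ch qs : PySem.Dict Int (List (Int × Int × Int))) (v : Int)
    (k : List VFrame) (st : UF × List Int) :
    runB ch qs (VFrame.visit 0 v :: k) st = runB ch qs k st := by rw [runB]

theorem runB_visit_succ (ch qs : PySem.Dict Int (List (Int × Int × Int))) (f : Nat) (v : Int)
    (k : List VFrame) (st : UF × List Int) :
    runB ch qs (VFrame.visit (f + 1) v :: k) st =
      runB ch qs
        (((qs.getD v []).map (fun q => VFrame.query q.1 q.2.1 q.2.2)
          ++ (ch.getD v []).flatMap (fun e => [VFrame.union e.2.1 e.2.2, VFrame.visit f e.1, VFrame.revoke]))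
          ++ k) st := by rw [runB]

theorem runB_query (ch qs : PySem.Dict Int (List (Int × Int × Int))) (a b qi : Int)
    (k : List VFrame) (st : UF × List Int) :
    runB ch qs (VFrame.query a b qi :: k) st =
      runB ch qs k (st.1, st.2.set qi.toNat (if ufConnected st.1 a b then 1 else 0)) := by rw [runB]

theorem runB_union (ch qs : PySem.Dict Int (List (Int × Int × Int))) (a b : Int)
    (k : List VFrame) (st : UF × List Int) :
    runB ch qs (VFrame.union a b :: k) st = runB ch qs k (ufUnion st.1 a b, st.2) := by rw [runB]

theorem runB_revoke (ch qs : PySem.Dict Int (List (Int × Int × Int)))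
    (k : List VFrame) (st : UF × List Int) :
    runB ch qs (VFrame.revoke :: k) st = runB ch qs k (ufRevoke st.1, st.2) := by rw [runB]

-- build-phase invariant: the two builds carry the same data
def BInv (m : Nat) (i : Nat) (a : BuildA) (b : BuildB) : Prop :=
  a.git = b.git ∧ a.cur = b.cur ∧ 0 ≤ a.cur ∧ a.cur ≤ (i : Int) ∧
  a.adj.length = m + 10 ∧ a.qg.length = m + 10 ∧
  (∀ x ∈ a.git, 0 ≤ x ∧ x ≤ a.cur) ∧
  (∀ v : Int, 0 ≤ v → PySem.List.pyGetD a.adj v [] = b.children.getD v []) ∧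
  (∀ v : Int, 0 ≤ v → PySem.List.pyGetD a.qg v [] = b.queries.getD v []) ∧
  (∀ v : Int, 0 ≤ v → ∀ e ∈ b.children.getD v [], 0 ≤ e.1)

-- appending one element at index t keeps a list-of-lists and the corresponding dict in step
theorem upd_pair (L : List (List (Int × Int × Int))) (D : PySem.Dict Int (List (Int × Int × Int)))
    (hLD : ∀ v : Int, 0 ≤ v → PySem.List.pyGetD L v [] = D.getD v [])
    (t : Int) (ht0 : 0 ≤ t) (htl : t.toNat < L.length) (x : Int × Int × Int) :
    ∀ v : Int, 0 ≤ v →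
      PySem.List.pyGetD (L.set t.toNat (PySem.List.pyGetD L t [] ++ [x])) v []
        = (D.modify t [] (· ++ [x])).getD v [] := by
  intro v hv
  rw [pyGetD_set_nonneg L t.toNat htl _ _ v hv, PySem.Dict.getD_modify]
  have htt : ((t.toNat : Nat) : Int) = t := Int.toNat_of_nonneg ht0
  rw [htt]
  by_cases hvt : v = t
  · rw [if_pos hvt, if_pos hvt, hLD t ht0]
  · rw [if_neg hvt, if_neg hvt]; exact hLD v hv

theorem upd_pos (D : PySem.Dict Int (List (Int × Int × Int)))
    (hpos : ∀ v : Int, 0 ≤ v → ∀ e ∈ D.getD v [], 0 ≤ e.1)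
    (t : Int) (ht0 : 0 ≤ t) (x : Int × Int × Int) (hx : 0 ≤ x.1) :
    ∀ v : Int, 0 ≤ v → ∀ e ∈ (D.modify t [] (· ++ [x])).getD v [], 0 ≤ e.1 := by
  intro v hv e he
  rw [PySem.Dict.getD_modify] at he
  by_cases hvt : v = t
  · rw [if_pos hvt] at he
    rcases List.mem_append.mp he with h1 | h2
    · exact hpos t ht0 e h1
    · simp at h2; subst h2; exact hx
  · exact hpos v hv e (by rwa [if_neg hvt] at he)

theorem step_inv (m i : Nat) (hi : i < m) (op : List Int) (a : BuildA) (b : BuildB)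
    (h : BInv m i a b) : BInv m (i + 1) (stepA i op a) (stepB i op b) := by
  obtain ⟨hgit, hcur, hc0, hci, hal, hql, hgm, hadj, hqg, hpos⟩ := h
  unfold stepA stepB
  rw [← hgit, ← hcur]
  have hcl : a.cur.toNat < a.adj.length := by rw [hal]; omega
  have hcq : a.cur.toNat < a.qg.length := by rw [hql]; omega
  by_cases hk1 : PySem.List.pyGetD op 0 0 = 1
  · simp only [if_pos hk1]
    refine ⟨rfl, rfl, by dsimp only; omega, by dsimp only; omega,
      by dsimp only; simpa using hal, by dsimp only; simpa using hql, ?_, ?_, ?_, ?_⟩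
    · dsimp only
      intro x hx
      rcases List.mem_or_eq_of_mem_set hx with hmem | rfl
      · have := hgm x hmem; constructor <;> omega
      · constructor <;> omega
    · exact upd_pair a.adj b.children hadj a.cur hc0 hcl _
    · exact hqg
    · exact upd_pos b.children hpos a.cur hc0 _ (by dsimp only; omega)
  · by_cases hk2 : PySem.List.pyGetD op 0 0 = 2
    · simp only [if_neg hk1, if_pos hk2]
      have hpb : 0 ≤ PySem.List.pyGetD a.git (PySem.List.pyGetD op 1 0) 0 ∧
          PySem.List.pyGetD a.git (PySem.List.pyGetD op 1 0) 0 ≤ a.cur := by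
        rcases pyGetD_default_or_mem a.git (PySem.List.pyGetD op 1 0) 0 with h0 | hm0
        · rw [h0]; exact ⟨le_refl _, hc0⟩
        · exact hgm _ hm0
      have hpl : (PySem.List.pyGetD a.git (PySem.List.pyGetD op 1 0) 0).toNat < a.adj.length := by
        rw [hal]; omega
      refine ⟨rfl, rfl, by dsimp only; omega, by dsimp only; omega,
        by dsimp only; simpa using hal, by dsimp only; simpa using hql, ?_, ?_, ?_, ?_⟩
      · dsimp only
        intro x hx
        rcases List.mem_or_eq_of_mem_set hx with hmem | rfl
        · have := hgm x hmem; constructor <;> omega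
        · constructor <;> omega
      · exact upd_pair a.adj b.children hadj _ hpb.1 hpl _
      · exact hqg
      · exact upd_pos b.children hpos _ hpb.1 _ (by dsimp only; omega)
    · by_cases hk3 : PySem.List.pyGetD op 0 0 = 3
      · simp only [if_neg hk1, if_neg hk2, if_pos hk3]
        refine ⟨rfl, rfl, by dsimp only; omega, by dsimp only; omega,
          by dsimp only; simpa using hal, by dsimp only; simpa using hql, ?_, ?_, ?_, ?_⟩
        · dsimp only
          intro x hx
          rcases List.mem_or_eq_of_mem_set hx with hmem | rfl
          · exact hgm x hmem
          · exact ⟨hc0, le_refl _⟩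
        · exact hadj
        · exact upd_pair a.qg b.queries hqg a.cur hc0 hcq _
        · exact hpos
      · simp only [if_neg hk1, if_neg hk2, if_neg hk3]
        refine ⟨by dsimp only; rw [hgit, hcur], by dsimp only; exact hcur, by dsimp only; omega, by dsimp only; omega,
          by dsimp only; exact hal, by dsimp only; exact hql, ?_, hadj, hqg, hpos⟩
        dsimp only
        intro x hx
        rcases List.mem_or_eq_of_mem_set hx with hmem | rfl
        · exact hgm x hmem
        · exact ⟨hc0, le_refl _⟩

theorem loop_inv (m : Nat) : ∀ (ops : List (List Int)) (i : Nat) (a : BuildA) (b : BuildB),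
    i + ops.length = m → BInv m i a b → BInv m m (loopA ops i a) (loopB ops i b) := by
  intro ops
  induction ops with
  | nil => intro i a b hm h; simp at hm; subst hm; simpa [loopA, loopB] using h
  | cons op rest ih =>
    intro i a b hm h
    simp only [loopA, loopB]
    have hm' : i + 1 + rest.length = m := by simp at hm; omega
    exact ih (i + 1) _ _ hm' (step_inv m i (by omega) op a b h)

-- the query frames execute A's query fold
theorem runB_queries (ch qs : PySem.Dict Int (List (Int × Int × Int)))
    (l : List (Int × Int × Int)) : ∀ (k : List VFrame) (st : UF × List Int),
    runB ch qs (l.map (fun q => VFrame.query q.1 q.2.1 q.2.2) ++ k) st =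
      runB ch qs k (l.foldl
        (fun st q => (st.1, st.2.set q.2.2.toNat (if ufConnected st.1 q.1 q.2.1 then 1 else 0))) st) := by
  induction l with
  | nil => intro k st; simp
  | cons q t ih =>
    intro k st
    simp only [List.map_cons, List.cons_append, List.foldl_cons, runB_query]
    exact ih k _

-- the union/visit/revoke triples execute A's edge fold, given the visit↔dfs equation at depth f
theorem runB_edges (ch qs : PySem.Dict Int (List (Int × Int × Int)))
    (adj qg : List (List (Int × Int × Int))) (f : Nat)
    (HIH : ∀ v : Int, 0 ≤ v → ∀ (st : UF × List Int) (k : List VFrame),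
      runB ch qs (VFrame.visit f v :: k) st = runB ch qs k (dfsA adj qg f v st)) :
    ∀ (es : List (Int × Int × Int)), (∀ e ∈ es, 0 ≤ e.1) →
    ∀ (st : UF × List Int) (k : List VFrame),
    runB ch qs (es.flatMap (fun e => [VFrame.union e.2.1 e.2.2, VFrame.visit f e.1, VFrame.revoke]) ++ k) st =
      runB ch qs k (es.foldl
        (fun st e =>
          let st2 := dfsA adj qg f e.1 (ufUnion st.1 e.2.1 e.2.2, st.2)
          (ufRevoke st2.1, st2.2)) st) := by
  intro es
  induction es with
  | nil => intro _ st k; simp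
  | cons e t ih =>
    intro hpos st k
    simp only [List.flatMap_cons, List.cons_append, List.nil_append, List.foldl_cons]
    rw [runB_union, HIH e.1 (hpos e (by simp)) _, runB_revoke]
    exact ih (fun x hx => hpos x (by simp [hx])) _ _

-- the interpreter executes the recursive dfs
theorem run_dfs (ch qs : PySem.Dict Int (List (Int × Int × Int)))
    (adj qg : List (List (Int × Int × Int)))
    (Hc : ∀ v : Int, 0 ≤ v → PySem.List.pyGetD adj v [] = ch.getD v [])
    (Hq : ∀ v : Int, 0 ≤ v → PySem.List.pyGetD qg v [] = qs.getD v [])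
    (Hpos : ∀ v : Int, 0 ≤ v → ∀ e ∈ ch.getD v [], 0 ≤ e.1) :
    ∀ (f : Nat) (v : Int), 0 ≤ v → ∀ (st : UF × List Int) (k : List VFrame),
    runB ch qs (VFrame.visit f v :: k) st = runB ch qs k (dfsA adj qg f v st) := by
  intro f
  induction f with
  | zero => intro v _ st k; rw [runB_visit_zero, dfsA_zero]
  | succ f ih =>
    intro v hv st k
    rw [runB_visit_succ, List.append_assoc, runB_queries,
      runB_edges ch qs adj qg f ih _ (Hpos v hv), dfsA_succ, Hc v hv, Hq v hv]

-- ===== VERDICT (by name: the statement is the Claim_ definition above) =====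
theorem solve_spec : Claim_equal_solve := by
  intro n operations _ _
  show solve n operations = solve_alt n operations
  simp only [solve, solve_alt]
  set m := operations.length with hm
  have hinv : BInv m m
      (loopA operations 0
        { adj := List.replicate (m + 10) [], qg := List.replicate (m + 10) []
        , git := List.replicate (m + 10) 0, cur := 0 })
      (loopB operations 0
        { children := PySem.Dict.empty, queries := PySem.Dict.empty
        , git := List.replicate (m + 10) 0, cur := 0 }) := by
    apply loop_inv m operations 0 _ _ (by omega)
    refine ⟨rfl, rfl, le_refl _, le_refl _, by simp, by simp, ?_, ?_, ?_, ?_⟩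
    · intro x hx; have := List.eq_of_mem_replicate hx; simp [this]
    · intro v _; simp [pyGetD_replicate_nil]
    · intro v _; simp [pyGetD_replicate_nil]
    · intro v _ e he; simp [PySem.Dict.getD_empty] at he
  obtain ⟨_, _, _, _, _, _, _, Hc, Hq, Hpos⟩ := hinv
  rw [run_dfs _ _ _ _ Hc Hq Hpos (m + 10) 0 (by omega), runB_nil]
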